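-- pv_equiv track=rewrite | github.com/fabianaferreira/advent-of-code-23 | day7/pt2.py | map_card_to_strength
-- ===== SOURCE A (Python) =====
-- def map_card_to_strength(card):
--     chars_map = {}
--     joker_count = 0
--
--     for char in card:
--         if char == "J":
--             joker_count += 1
--             continue
--         if chars_map.get(char, -1) == -1:
--             chars_map[char] = 1
--         else:
--             chars_map[char] += 1
--
--     # Sort map by values
--     sorted_chars = dict(sorted(chars_map.items(), key=lambda x: x[1], reverse=True))
--     if joker_count == 5:
--         return "5"
--     first_key = next(iter(sorted_chars), -1)
--     if first_key != -1:
--         sorted_chars[first_key] += joker_count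
--     return "".join([str(x) for x in sorted_chars.values()])
-- ===== SOURCE B (Python) =====
-- def map_card_to_strength(card):
--     rest = sorted(c for c in card if c != "J")
--     jokers = len(card) - len(rest)
--     if jokers == 5:
--         return "5"
--     counts = []
--     while rest:
--         run = 1
--         while run < len(rest) and rest[run] == rest[0]:
--             run += 1
--         counts.append(run)
--         rest = rest[run:]
--     counts.sort(reverse=True)
--     if counts:
--         counts[0] += jokers
--     return "".join(str(c) for c in counts)
-- ===== Notes on version B (the rewrite author's own statement) =====
-- stated objective: idiomatic
-- what changed: B replaces A's dict-counting pass and sort-by-value-then-mutate-the-dict with the standard filter/sort/run-length-scan: drop the jokers, sort the remaining cards, read off run lengths, sort them descending and add the joker count to the leading (maximal) count.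
import Mathlib
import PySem

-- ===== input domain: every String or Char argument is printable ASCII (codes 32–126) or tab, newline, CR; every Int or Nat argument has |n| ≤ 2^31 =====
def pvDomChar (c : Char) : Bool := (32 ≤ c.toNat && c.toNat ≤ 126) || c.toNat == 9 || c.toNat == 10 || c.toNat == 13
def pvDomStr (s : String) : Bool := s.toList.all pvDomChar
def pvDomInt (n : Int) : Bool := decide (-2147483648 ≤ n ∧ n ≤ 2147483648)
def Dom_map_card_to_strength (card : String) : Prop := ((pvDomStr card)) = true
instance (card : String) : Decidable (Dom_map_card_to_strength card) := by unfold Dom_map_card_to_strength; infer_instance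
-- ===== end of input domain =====

-- B replaces A's dict-building pass and sort-by-value of a dict with filter/sort/run-length-scan over the hand (alternative decomposition, same cost).

-- ===== PORT A =====
-- loop state: (chars_map, joker_count); 'chars_map[char] += 1' is executed only when the key
-- is present, where it equals 'insert char (getD char (-1) + 1)'
def map_card_to_strength (card : String) : String :=
  let st := card.toList.foldl
    (fun (p : PySem.Dict Char Int × Int) char =>
      if char = 'J' then (p.1, p.2 + 1)
      else if p.1.getD char (-1) = -1 then (p.1.insert char 1, p.2)
      else (p.1.insert char (p.1.getD char (-1) + 1), p.2))
    (PySem.Dict.empty, 0)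
  let sorted_chars := PySem.Dict.ofList (PySem.List.sorted st.1.items (fun x => x.2) true)
  if st.2 = 5 then "5"
  else
    -- first_key = next(iter(sorted_chars), -1); the sentinel branch is the empty-dict case
    let sorted_chars2 :=
      match sorted_chars.keys with
      | [] => sorted_chars
      | k :: _ => sorted_chars.insert k (sorted_chars.getD k 0 + st.2)
    PySem.Str.join "" (sorted_chars2.values.map PySem.Int.toStr)

-- ===== PORT B =====
-- the inner while loop: run = 1 + number of leading chars of the tail equal to rest[0];
-- rest = rest[run:] drops exactly that block
def pvRuns : List Char → List Int
  | [] => []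
  | c :: t =>
    ((1 + (t.takeWhile (· == c)).length : Nat) : Int) :: pvRuns (t.dropWhile (· == c))
termination_by l => l.length
decreasing_by
  exact Nat.lt_succ_of_le (List.length_dropWhile_le _ _)

def map_card_to_strength_alt (card : String) : String :=
  let rest := PySem.List.sorted (card.toList.filter (fun c => c != 'J')) (fun c => c) false
  let jokers : Int := (card.toList.length : Int) - rest.length
  if jokers = 5 then "5"
  else
    let counts := PySem.List.sorted (pvRuns rest) (fun c => c) true
    let counts2 := match counts with
      | [] => ([] : List Int)
      | c :: t => (c + jokers) :: t
    PySem.Str.join "" (counts2.map PySem.Int.toStr)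

-- ===== PRECONDITION & SPEC =====
def Spec_map_card_to_strength (card : String) (out : String) : Prop := out = map_card_to_strength_alt card
instance (card : String) (out : String) : Decidable (Spec_map_card_to_strength card out) := by unfold Spec_map_card_to_strength; infer_instance

-- ===== CLAIM (what is proved, stated in full; the proofs are below) =====
def Claim_equal_map_card_to_strength : Prop := ∀ (card : String), Dom_map_card_to_strength card → Spec_map_card_to_strength card (map_card_to_strength card)

-- ===== LEMMAS AND PROOFS =====

theorem pvGetD_counter_neg (m : List Char) (c : Char) :
    (PySem.Dict.counter m).getD c (-1) = if c ∈ m then (m.count c : Int) else -1 := by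
  by_cases hc : c ∈ m
  · simp only [hc, if_true]
    have h1 : (PySem.Dict.counter m).contains c = true := by
      rw [PySem.Dict.contains_counter]; exact List.contains_iff_mem.mpr hc
    rw [PySem.Dict.contains_eq_isSome_get?] at h1
    obtain ⟨v, hv⟩ := Option.isSome_iff_exists.mp h1
    have h0 := PySem.Dict.getD_counter m c
    rw [PySem.Dict.getD_eq_get?_getD, hv] at h0 ⊢
    exact h0
  · simp only [hc, if_false]
    apply PySem.Dict.getD_of_not_contains
    rw [PySem.Dict.contains_counter]
    simpa using hc

-- A's counting loop builds Counter(non-J chars) and counts the jokers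
theorem pvA_loop (l m : List Char) (j : Int) :
    l.foldl
      (fun (p : PySem.Dict Char Int × Int) char =>
        if char = 'J' then (p.1, p.2 + 1)
        else if p.1.getD char (-1) = -1 then (p.1.insert char 1, p.2)
        else (p.1.insert char (p.1.getD char (-1) + 1), p.2))
      (PySem.Dict.counter m, j)
    = (PySem.Dict.counter (m ++ l.filter (fun c => c != 'J')), j + l.count 'J') := by
  induction l generalizing m j with
  | nil => simp
  | cons c t ih =>
    simp only [List.foldl_cons]
    by_cases hcJ : c = 'J'
    · subst hcJ
      simp only [if_true, List.filter_cons]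
      rw [ih m (j + 1)]
      simp
      omega
    · have hstep :
        (if c = 'J' then ((PySem.Dict.counter m, j + 1) : PySem.Dict Char Int × Int)
         else if (PySem.Dict.counter m).getD c (-1) = -1 then ((PySem.Dict.counter m).insert c 1, j)
         else ((PySem.Dict.counter m).insert c ((PySem.Dict.counter m).getD c (-1) + 1), j))
          = (PySem.Dict.counter (m ++ [c]), j) := by
        rw [if_neg hcJ, pvGetD_counter_neg]
        have hmod : PySem.Dict.counter (m ++ [c])
            = (PySem.Dict.counter m).insert c ((PySem.Dict.counter m).getD c 0 + 1) :=
          PySem.Dict.counter_append_singleton m c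
        by_cases hc : c ∈ m
        · have hpos : (0:Int) < m.count c := by
            exact_mod_cast List.count_pos_iff.mpr hc
          rw [if_pos hc, if_neg (by omega)]
          rw [hmod, PySem.Dict.getD_counter]
        · rw [if_neg hc, if_pos rfl, hmod, PySem.Dict.getD_counter]
          simp [List.count_eq_zero_of_not_mem hc]
      rw [hstep, ih (m ++ [c]) j]
      simp [hcJ, List.append_assoc]

-- run lengths of a sorted list are a permutation of the per-character counts
theorem pvRuns_perm (s : List Char) (h : s.Pairwise (· ≤ ·)) :
    (pvRuns s).Perm ((PySem.Set.ofList s).map (fun k => (s.count k : Int))) := by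
  induction s using pvRuns.induct with
  | case1 => simp [pvRuns]
  | case2 c t ih =>
    have htd := (List.takeWhile_append_dropWhile (p := (· == c)) (l := t)).symm
    have htw : ∀ x ∈ t.takeWhile (· == c), x = c := fun x hx => by
      simpa using List.mem_takeWhile_imp hx
    have hpdr : (t.dropWhile (· == c)).Pairwise (· ≤ ·) :=
      (List.pairwise_cons.mp h).2.sublist (List.dropWhile_sublist _)
    -- every element of the dropped part is ≠ c
    have hdr : ∀ x ∈ t.dropWhile (· == c), x ≠ c := by
      intro x hx
      cases hd : t.dropWhile (· == c) with
      | nil => simp [hd] at hx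
      | cons d dr' =>
        have hne : t.dropWhile (· == c) ≠ [] := by simp [hd]
        have hdc : ¬ d = c := by
          have := List.head_dropWhile_not (p := (· == c)) (l := t) hne
          simpa [hd] using this
        have hcd : c < d := by
          have hdt : d ∈ t := (List.dropWhile_sublist _).subset (by rw [hd]; exact List.mem_cons_self)
          exact lt_of_le_of_ne ((List.pairwise_cons.mp h).1 d hdt) (Ne.symm hdc)
        rw [hd] at hx hpdr
        rcases List.mem_cons.mp hx with rfl | hx'
        · exact ne_of_gt hcd
        · exact ne_of_gt (lt_of_lt_of_le hcd ((List.pairwise_cons.mp hpdr).1 x hx'))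
    have hctw : (t.takeWhile (· == c)).count c = (t.takeWhile (· == c)).length :=
      List.count_eq_length.mpr (fun x hx => by simp [htw x hx])
    have hcdr : (t.dropWhile (· == c)).count c = 0 :=
      List.count_eq_zero.mpr (fun hx => hdr c hx rfl)
    have hct : t.count c = (t.takeWhile (· == c)).length := by
      conv_lhs => rw [htd]
      rw [List.count_append, hctw, hcdr]
      omega
    have hcnt : ((c :: t).count c : Int) = ((1 + (t.takeWhile (· == c)).length : Nat) : Int) := by
      congr 1
      rw [List.count_cons_self, hct]
      omega
    have hperm : (PySem.Set.ofList (c :: t)).Perm (c :: PySem.Set.ofList (t.dropWhile (· == c))) := by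
      rw [List.perm_ext_iff_of_nodup (PySem.Set.nodup_ofList _)
        (List.nodup_cons.mpr ⟨fun hx => hdr c ((PySem.Set.mem_ofList _ _).mp hx) rfl,
          PySem.Set.nodup_ofList _⟩)]
      intro a
      simp only [PySem.Set.mem_ofList, List.mem_cons]
      constructor
      · rintro (rfl | ha)
        · exact Or.inl rfl
        · rw [htd] at ha
          rcases List.mem_append.mp ha with ha' | ha'
          · exact Or.inl (htw a ha')
          · exact Or.inr ha'
      · rintro (rfl | ha)
        · exact Or.inl rfl
        · exact Or.inr (by rw [htd]; exact List.mem_append_right _ ha)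
    have hcong : ∀ a ∈ PySem.Set.ofList (t.dropWhile (· == c)),
        ((t.dropWhile (· == c)).count a : Int) = ((c :: t).count a : Int) := by
      intro a ha
      rw [PySem.Set.mem_ofList] at ha
      have hac : a ≠ c := hdr a ha
      congr 1
      have h0 : (t.takeWhile (· == c)).count a = 0 :=
        List.count_eq_zero.mpr (fun hx => hac (htw a hx))
      simp only [List.count_cons, beq_iff_eq, if_neg (Ne.symm hac), Nat.add_zero]
      conv_rhs => rw [htd]
      rw [List.count_append, h0, Nat.zero_add]
    rw [pvRuns, ← hcnt]
    refine ((ih hpdr).cons (((c :: t).count c : Int))).trans ?_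
    have heq : (((c :: t).count c : Int)
        :: (PySem.Set.ofList (t.dropWhile (· == c))).map (fun k => ((t.dropWhile (· == c)).count k : Int)))
        = (c :: PySem.Set.ofList (t.dropWhile (· == c))).map (fun k => (((c :: t).count k : Int))) := by
      simp only [List.map_cons]
      rw [List.map_congr_left hcong]
    rw [heq]
    exact (hperm.map _).symm

-- descending sort is determined by the multiset
theorem pvSortedRev_eq_of_perm {X Y : List Int} (h : X.Perm Y) :
    PySem.List.sorted X (fun c => c) true = PySem.List.sorted Y (fun c => c) true := by
  apply PySem.List.eq_of_perm_of_pairwise_le_of_injective (fun x : Int => -x) neg_injective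
  · exact ((PySem.List.sorted_perm X _ true).trans h).trans (PySem.List.sorted_perm Y _ true).symm
  · exact (PySem.List.sorted_pairwise_rev X _).imp (fun hab => by omega)
  · exact (PySem.List.sorted_pairwise_rev Y _).imp (fun hab => by omega)

theorem pvMapSnd_sorted (items : List (Char × Int)) :
    (PySem.List.sorted items (fun x => x.2) true).map (·.2)
      = PySem.List.sorted (items.map (·.2)) (fun c => c) true := by
  apply PySem.List.eq_of_perm_of_pairwise_le_of_injective (fun x : Int => -x) neg_injective
  · exact ((PySem.List.sorted_perm items _ true).map _).trans (PySem.List.sorted_perm _ _ true).symm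
  · exact (PySem.List.sorted_pairwise_rev items _).map _ (fun a b hab => by simpa using hab)
  · exact (PySem.List.sorted_pairwise_rev _ _).imp (fun hab => by omega)

theorem pvMain (card : String) : map_card_to_strength card = map_card_to_strength_alt card := by
  unfold map_card_to_strength map_card_to_strength_alt
  have hempty : (PySem.Dict.empty : PySem.Dict Char Int) = PySem.Dict.counter [] := rfl
  rw [hempty, pvA_loop]
  set l := card.toList with hl
  set f := l.filter (fun c => c != 'J') with hf
  set rest := PySem.List.sorted f (fun c => c) false with hrest
  -- joker count
  have hjok : (0 + (l.count 'J' : Int)) = (l.length : Int) - (rest.length : Int) := by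
    have h1 : rest.length = f.length := PySem.List.length_sorted f _ _
    have h2 : ∀ (L : List Char), L.count 'J' + (L.filter (fun c => c != 'J')).length = L.length := by
      intro L
      induction L with
      | nil => simp
      | cons c t ih =>
        by_cases hc : c = 'J' <;>
          simp [hc, bne_iff_ne] <;> omega
    have h3 := h2 l
    rw [h1, hf]
    omega
  simp only [List.nil_append]
  rw [hjok]
  by_cases hj : (l.length : Int) - (rest.length : Int) = 5
  · rw [if_pos hj, if_pos hj]
  · rw [if_neg hj, if_neg hj]
    set s := PySem.List.sorted (PySem.Dict.counter f).items (fun x => x.2) true with hs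
    -- items of the rebuilt dict
    have hnodup : (s.map Prod.fst).Nodup := by
      have hperm : (s.map Prod.fst).Perm ((PySem.Dict.counter f).items.map Prod.fst) :=
        (PySem.List.sorted_perm _ _ _).map _
      exact hperm.nodup_iff.mpr (PySem.Dict.nodup_keys_counter f)
    have hitems : (PySem.Dict.ofList s).items = s := by
      have hof : PySem.Dict.ofList s = s.foldl (fun d p => d.insert p.1 p.2) PySem.Dict.empty := rfl
      rw [hof]
      have := PySem.Dict.items_foldl_insert_fresh s Prod.fst Prod.snd PySem.Dict.empty
        (fun a _ => by simp [PySem.Dict.contains_empty]) hnodup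
      simpa using this
    have hkeys : (PySem.Dict.ofList s).keys = s.map Prod.fst := by
      simp only [PySem.Dict.keys, hitems]
    -- B's counts equal A's sorted values
    have hcounts : PySem.List.sorted (pvRuns rest) (fun c => c) true = s.map (·.2) := by
      rw [hs, pvMapSnd_sorted]
      apply pvSortedRev_eq_of_perm
      have hrp : rest.Perm f := PySem.List.sorted_perm _ _ _
      have hof : (PySem.Set.ofList rest).Perm (PySem.Set.ofList f) := by
        rw [List.perm_ext_iff_of_nodup (PySem.Set.nodup_ofList _) (PySem.Set.nodup_ofList _)]
        intro a; rw [PySem.Set.mem_ofList, PySem.Set.mem_ofList]; exact hrp.mem_iff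
      have e1 : (pvRuns rest).Perm ((PySem.Set.ofList rest).map (fun k => (rest.count k : Int))) :=
        pvRuns_perm rest (by simpa using PySem.List.sorted_pairwise f (fun c => c))
      have e2 : ((PySem.Set.ofList rest).map (fun k => (rest.count k : Int)))
          = ((PySem.Set.ofList rest).map (fun k => (f.count k : Int))) := by
        apply List.map_congr_left; intro a _; rw [hrp.count_eq]
      have e3 : ((PySem.Set.ofList rest).map (fun k => (f.count k : Int))).Perm
          ((PySem.Set.ofList f).map (fun k => (f.count k : Int))) := hof.map _
      have e4 : ((PySem.Set.ofList f).map (fun k => (f.count k : Int)))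
          = ((PySem.Dict.counter f).items.map (·.2)) := by
        rw [PySem.Dict.items_counter, List.map_map]; rfl
      exact ((e1.trans (e2 ▸ e3)).trans (e4 ▸ List.Perm.refl _))
    rw [hcounts]
    cases hsv : s with
    | nil =>
      rw [hsv] at hkeys hitems
      simp only [List.map_nil] at hkeys ⊢
      rw [hkeys]
      simp [PySem.Dict.values, hitems]
    | cons p srest =>
      rw [hsv] at hkeys hitems hnodup
      simp only [List.map_cons] at hkeys ⊢
      rw [hkeys]
      have hnk : (PySem.Dict.ofList (p :: srest)).keys.Nodup := by rw [hkeys]; exact (by simpa using hnodup)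
      have hmem : (p.1, p.2) ∈ (PySem.Dict.ofList (p :: srest)).items := by
        rw [hitems]; exact (by simp)
      have hget : (PySem.Dict.ofList (p :: srest)).getD p.1 0 = p.2 :=
        PySem.Dict.getD_of_mem_items _ hmem hnk 0
      have hcont : (PySem.Dict.ofList (p :: srest)).contains p.1 = true := by
        rw [PySem.Dict.contains_iff_mem_keys, hkeys]; exact List.mem_cons_self
      have hvals : ((PySem.Dict.ofList (p :: srest)).insert p.1
          ((PySem.Dict.ofList (p :: srest)).getD p.1 0 + ((l.length : Int) - (rest.length : Int)))).values
          = (p.2 + ((l.length : Int) - (rest.length : Int))) :: srest.map (·.2) := by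
        simp only [PySem.Dict.values, PySem.Dict.items_insert_of_contains _ _ hcont, hitems, hget]
        simp only [List.map_cons, beq_self_eq_true, if_true]
        congr 1
        rw [List.map_map]
        apply List.map_congr_left
        intro q hq
        have hqne : q.1 ≠ p.1 := by
          intro he
          have := List.nodup_cons.mp hnodup
          exact this.1 (he ▸ List.mem_map_of_mem hq)
        simp [Function.comp, hqne]
      rw [hvals]
      simp only [List.map_cons]

-- ===== VERDICT (by name: the statement is the Claim_ definition above) =====
theorem map_card_to_strength_spec : Claim_equal_map_card_to_strength := by
  intro card _
  exact pvMain card
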